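-- pv_equiv track=rewrite | github.com/taulukointipalvelut/utab | system/modules/property_modules.py | next_wins_distribution
-- ===== SOURCE A (Python) =====
-- def next_wins_distribution(wins_distribution, teamnum):
-- 	wins_distribution2 = []
-- 	for i in range(100):
-- 		weight_init = int(wins_distribution.count(i)/teamnum)
-- 		weight_last = wins_distribution.count(i)-(teamnum-1)*int(wins_distribution.count(i)/teamnum)
-- 		for j in range(teamnum-1):
-- 			wins_distribution2 += [i+j]*weight_init
-- 		wins_distribution2 += [i+teamnum-1]*weight_last
-- 	#print wins_distribution2
-- 	wins_distribution2.sort(reverse=True)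
-- 	return wins_distribution2
-- ===== SOURCE B (Python) =====
-- def next_wins_distribution(wins_distribution, teamnum):
--     # Count the base values, turn the per-value quotients into prefix sums, and
--     # compute each output value's multiplicity directly with a sliding-window
--     # difference of prefix sums, emitting the result descending (no sort, no
--     # per-value expansion loops, no repeated .count scans).
--     cnt = [0] * 100
--     for x in wins_distribution:
--         if 0 <= x < 100:
--             cnt[x] += 1
--     q = [c // teamnum for c in cnt]
--     prefix = [0]
--     s = 0
--     for c in q:
--         s += c
--         prefix.append(s)
--     out = []
--     for v in range(99 + teamnum - 1, -1, -1):
--         lo = max(v - teamnum + 2, 0)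
--         hi = min(v + 1, 100)
--         w = prefix[hi] - prefix[lo] if lo < hi else 0
--         b = v - teamnum + 1
--         if 0 <= b < 100:
--             w += cnt[b] - (teamnum - 1) * q[b]
--         out.extend([v] * w)
--     return out
-- ===== Notes on version B (the rewrite author's own statement) =====
-- stated objective: faster
-- what changed: B counts the base values once, forms prefix sums of the per-value quotients, and computes each output value's multiplicity by a sliding-window prefix-sum difference while emitting descending, replacing A's 300 full-list count() scans, its per-value expansion loops and its comparison sort; Pre_ excludes teamnum <= 0 (teamnum = 0 makes A raise ZeroDivisionError, and a non-positive number of teams is outside the function's natural domain, where A's truncating division and negative output values are accidental).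
-- outside the precondition, e.g. on next_wins_distribution([5], -2): A returns [2], B returns []; on next_wins_distribution([1], 0): A raises ZeroDivisionError, B raises ZeroDivisionError
import Mathlib
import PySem

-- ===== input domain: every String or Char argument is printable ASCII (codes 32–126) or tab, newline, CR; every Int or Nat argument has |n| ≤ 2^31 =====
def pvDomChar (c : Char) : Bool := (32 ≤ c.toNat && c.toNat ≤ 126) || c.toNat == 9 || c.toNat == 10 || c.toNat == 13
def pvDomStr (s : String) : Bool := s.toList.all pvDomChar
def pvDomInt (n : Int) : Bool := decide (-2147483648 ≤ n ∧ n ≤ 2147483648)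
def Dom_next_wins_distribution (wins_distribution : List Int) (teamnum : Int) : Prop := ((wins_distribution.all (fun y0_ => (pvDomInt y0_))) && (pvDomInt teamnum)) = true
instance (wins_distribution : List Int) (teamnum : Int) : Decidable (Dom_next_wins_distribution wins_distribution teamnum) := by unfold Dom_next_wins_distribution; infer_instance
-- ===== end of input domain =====

-- B replaces A's 300 full-list count() scans, its per-value expansion loops and its
-- comparison sort by one counting pass, prefix sums of the per-value quotients and a
-- sliding-window descending emission (objective: faster).


-- ===== PORT A =====
-- int(count/teamnum) is truncating division (PySem.Int.truncdiv, exact while the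
-- magnitudes stay below 2^53, which the sampled domain guarantees)
def next_wins_distribution (wins_distribution : List Int) (teamnum : Int) : List Int :=
  let wins_distribution2 :=
    (PySem.List.pyRange 0 100 1).foldl (fun acc i =>
      let weight_init : Int :=
        PySem.Int.truncdiv ((PySem.List.count wins_distribution i : Nat) : Int) teamnum
      let weight_last : Int :=
        ((PySem.List.count wins_distribution i : Nat) : Int) -
          (teamnum - 1) * PySem.Int.truncdiv ((PySem.List.count wins_distribution i : Nat) : Int) teamnum
      let acc2 := (PySem.List.pyRange 0 (teamnum - 1) 1).foldl
        (fun a j => a ++ PySem.List.pyRepeat [i + j] weight_init) acc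
      acc2 ++ PySem.List.pyRepeat [i + teamnum - 1] weight_last) []
  PySem.List.sorted wins_distribution2 (fun x => x) true

-- ===== PORT B =====
-- B-side helpers: each one is one statement block of Source B.
-- cnt = [0]*100; for x in wins_distribution: if 0 <= x < 100: cnt[x] += 1
-- (indices are guarded in range, so pyGetD/pySetD are exact here)
def pvCounts (wins_distribution : List Int) : List Int :=
  wins_distribution.foldl
    (fun a x => if 0 ≤ x ∧ x < 100 then
        PySem.List.pySetD a x (PySem.List.pyGetD a x 0 + 1)
      else a)
    (List.replicate 100 0)

-- q = [c // teamnum for c in cnt]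
def pvQuot (cnt : List Int) (teamnum : Int) : List Int :=
  cnt.map (fun c => PySem.Int.floordiv c teamnum)

-- prefix = [0]; s = 0; for c in q: s += c; prefix.append(s)
def pvPrefix (q : List Int) : List Int :=
  (q.foldl (fun (p : List Int × Int) c => (p.1 ++ [p.2 + c], p.2 + c)) ([0], 0)).1

-- the body of the emission loop: the multiplicity of output value v
def pvWeight (cnt q pfx : List Int) (teamnum v : Int) : Int :=
  let lo := max (v - teamnum + 2) 0
  let hi := min (v + 1) 100
  let w0 : Int := if lo < hi then PySem.List.pyGetD pfx hi 0 - PySem.List.pyGetD pfx lo 0 else 0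
  let b := v - teamnum + 1
  if 0 ≤ b ∧ b < 100 then
    w0 + (PySem.List.pyGetD cnt b 0 - (teamnum - 1) * PySem.List.pyGetD q b 0)
  else w0

def next_wins_distribution_alt (wins_distribution : List Int) (teamnum : Int) : List Int :=
  let cnt := pvCounts wins_distribution
  let q := pvQuot cnt teamnum
  let pfx := pvPrefix q
  (PySem.List.pyRange (99 + teamnum - 1) (-1) (-1)).foldl
    (fun out v => out ++ PySem.List.pyRepeat [v] (pvWeight cnt q pfx teamnum v)) []

-- ===== PRECONDITION & SPEC =====
-- teamnum = 0 makes A raise ZeroDivisionError; a non-positive number of teams is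
-- outside the function's natural domain (for teamnum < 0 A's truncating division and
-- negative output values are accidental), so Pre_ restricts to 1 ≤ teamnum.
def Pre_next_wins_distribution (wins_distribution : List Int) (teamnum : Int) : Prop :=
  1 ≤ teamnum
instance (wins_distribution : List Int) (teamnum : Int) : Decidable (Pre_next_wins_distribution wins_distribution teamnum) := by unfold Pre_next_wins_distribution; infer_instance

def pvWitness_next_wins_distribution : List Int × Int := ([3, 3, 0, 7], 2)

def Spec_next_wins_distribution (wins_distribution : List Int) (teamnum : Int) (out : List Int) : Prop := out = next_wins_distribution_alt wins_distribution teamnum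
instance (wins_distribution : List Int) (teamnum : Int) (out : List Int) : Decidable (Spec_next_wins_distribution wins_distribution teamnum out) := by unfold Spec_next_wins_distribution; infer_instance

-- ===== CLAIM (what is proved, stated in full; the proofs are below) =====
def Claim_equal_next_wins_distribution : Prop := ∀ (wins_distribution : List Int) (teamnum : Int), Dom_next_wins_distribution wins_distribution teamnum → Pre_next_wins_distribution wins_distribution teamnum → Spec_next_wins_distribution wins_distribution teamnum (next_wins_distribution wins_distribution teamnum)

-- ===== LEMMAS AND PROOFS =====

-- the per-source-value weights and their contribution to output value v
def pvQf (wd : List Int) (t i : Int) : Int :=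
  PySem.Int.floordiv ((List.count i wd : Nat) : Int) t
def pvLast (wd : List Int) (t i : Int) : Int :=
  ((List.count i wd : Nat) : Int) - (t - 1) * pvQf wd t i
def pvContrib (wd : List Int) (t i v : Int) : Int :=
  (if i ≤ v ∧ v ≤ i + t - 2 then pvQf wd t i else 0) +
  (if v = i + t - 1 then pvLast wd t i else 0)
def pvNContrib (wd : List Int) (t i v : Int) : Nat :=
  (if i ≤ v ∧ v ≤ i + t - 2 then (pvQf wd t i).toNat else 0) +
  (if v = i + t - 1 then (pvLast wd t i).toNat else 0)
-- A's list before sorting, in flatMap form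
def pvPresort (wd : List Int) (t : Int) : List Int :=
  (PySem.List.pyRange 0 100 1).flatMap (fun i =>
    (PySem.List.pyRange 0 (t - 1) 1).flatMap
      (fun j => List.replicate (pvQf wd t i).toNat (i + j)) ++
    List.replicate (pvLast wd t i).toNat (i + t - 1))
-- the total weight assigned to output value v
def pvSum (wd : List Int) (t v : Int) : Int :=
  ((PySem.List.pyRange 0 100 1).map (fun i => pvContrib wd t i v)).sum

theorem pv_count_flatMap (l : List Int) (g : Int → List Int) (v : Int) :
    (l.flatMap g).count v = (l.map (fun i => (g i).count v)).sum := by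
  induction l with
  | nil => simp
  | cons a l ih => simp [List.flatMap_cons, List.count_append, ih]

theorem pv_sum_ite_single {M : Type} [AddCommMonoid M] (l : List Int) (hl : l.Nodup)
    (a : Int) (n : Int → M) :
    (l.map (fun j => if j = a then n j else 0)).sum = if a ∈ l then n a else 0 := by
  induction l with
  | nil => simp
  | cons b l ih =>
    have hb : b ∉ l := (List.nodup_cons.mp hl).1
    have hl' : l.Nodup := (List.nodup_cons.mp hl).2
    by_cases hba : b = a
    · subst hba
      have : ∀ x ∈ l.map (fun j => if j = b then n j else 0), x = 0 := by
        intro x hx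
        rcases List.mem_map.mp hx with ⟨j, hj, rfl⟩
        have : j ≠ b := fun h => hb (h ▸ hj)
        simp [this]
      simp [List.sum_eq_zero this]
    · simp only [List.map_cons, List.sum_cons, if_neg hba, zero_add, ih hl', List.mem_cons]
      have hab : ¬ a = b := fun h => hba h.symm
      simp [hab]

-- A's port is sorted(pvPresort, reverse=True) (for 1 ≤ t the truncating division
-- int(c/t) agrees with floor division c // t since the counts are nonnegative)
theorem pv_A_eq (wd : List Int) (t : Int) (ht : 1 ≤ t) :
    next_wins_distribution wd t = PySem.List.sorted (pvPresort wd t) (fun x => x) true := by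
  simp only [next_wins_distribution]
  congr 1
  have htd : ∀ i : Int,
      PySem.Int.truncdiv ((List.count i wd : Nat) : Int) t = pvQf wd t i := by
    intro i
    unfold pvQf
    rw [PySem.Int.floordiv_eq_ediv_of_pos (by omega)]
    simp [PySem.Int.truncdiv, Int.tdiv_eq_ediv_of_nonneg (Int.natCast_nonneg _)]
  have hbody : ∀ (acc : List Int) (i : Int), i ∈ PySem.List.pyRange 0 100 1 →
      (fun (acc : List Int) (i : Int) =>
        ((PySem.List.pyRange 0 (t - 1) 1).foldl
          (fun a j => a ++ PySem.List.pyRepeat [i + j]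
            (PySem.Int.truncdiv ((PySem.List.count wd i : Nat) : Int) t)) acc) ++
        PySem.List.pyRepeat [i + t - 1]
          (((PySem.List.count wd i : Nat) : Int) -
            (t - 1) * PySem.Int.truncdiv ((PySem.List.count wd i : Nat) : Int) t)) acc i =
      acc ++ ((PySem.List.pyRange 0 (t - 1) 1).flatMap
          (fun j => List.replicate (pvQf wd t i).toNat (i + j)) ++
        List.replicate (pvLast wd t i).toNat (i + t - 1)) := by
    intro acc i hi
    simp only [PySem.List.pyRepeat_singleton, pvLast, PySem.List.count_eq, htd]
    rw [PySem.List.foldl_append_eq_flatMap, List.append_assoc]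
  have hco := PySem.List.foldl_congr_mem _ _ _ ([] : List Int) hbody
  rw [hco, PySem.List.foldl_append_eq_flatMap]
  simp [pvPresort]

-- ---- characterising pvCounts ----

theorem pv_counts_len_aux (l : List Int) (a : List Int) (ha : a.length = 100) :
    (l.foldl (fun a x => if 0 ≤ x ∧ x < 100 then
        PySem.List.pySetD a x (PySem.List.pyGetD a x 0 + 1) else a) a).length = 100 := by
  induction l generalizing a with
  | nil => exact ha
  | cons x l ih =>
    simp only [List.foldl_cons]
    split_ifs with hx
    · exact ih _ (by rw [PySem.List.length_pySetD]; exact ha)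
    · exact ih _ ha

theorem pv_counts_getD_aux (l : List Int) (a : List Int) (ha : a.length = 100)
    (v : Nat) (hv : v < 100) :
    PySem.List.pyGetD (l.foldl (fun a x => if 0 ≤ x ∧ x < 100 then
        PySem.List.pySetD a x (PySem.List.pyGetD a x 0 + 1) else a) a) (v : Int) 0 =
      PySem.List.pyGetD a (v : Int) 0 + (List.count ((v : Nat) : Int) l : Int) := by
  induction l generalizing a with
  | nil => simp
  | cons x l ih =>
    simp only [List.foldl_cons]
    by_cases hx : 0 ≤ x ∧ x < 100
    · rw [if_pos hx]
      have hx' : x = ((x.toNat : Nat) : Int) := (Int.toNat_of_nonneg hx.1).symm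
      have hlt : x.toNat < a.length := by omega
      have hset : PySem.List.pySetD a x (PySem.List.pyGetD a x 0 + 1) =
          PySem.List.pySetD a ((x.toNat : Nat) : Int) (PySem.List.pyGetD a x 0 + 1) := by
        rw [← hx']
      rw [hset, ih _ (by rw [PySem.List.length_pySetD]; exact ha),
        PySem.List.pyGetD_pySetD_natCast a x.toNat v _ 0 hlt]
      by_cases hxv : x = ((v : Nat) : Int)
      · rw [if_pos (show v = x.toNat by omega), hxv, List.count_cons_self]
        push_cast
        ring
      · rw [if_neg (show ¬ v = x.toNat by omega), List.count_cons_of_ne hxv]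
    · rw [if_neg hx, ih _ ha, List.count_cons_of_ne (by intro h; omega)]

theorem pv_counts_len (wd : List Int) : (pvCounts wd).length = 100 :=
  pv_counts_len_aux wd _ (by simp)

theorem pv_counts_getD (wd : List Int) (v : Nat) (hv : v < 100) :
    PySem.List.pyGetD (pvCounts wd) (v : Int) 0 = (List.count ((v : Nat) : Int) wd : Int) := by
  unfold pvCounts
  rw [pv_counts_getD_aux wd _ (by simp) v hv, PySem.List.pyGetD_natCast,
    List.getD_eq_getElem _ _ (by simpa using hv), List.getElem_replicate]
  simp

theorem pv_quot_getD (wd : List Int) (t : Int) (v : Nat) (hv : v < 100) :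
    PySem.List.pyGetD (pvQuot (pvCounts wd) t) (v : Int) 0 = pvQf wd t ((v : Nat) : Int) := by
  have hlen : (pvCounts wd).length = 100 := pv_counts_len wd
  unfold pvQuot pvQf
  rw [PySem.List.pyGetD_natCast, List.getD_eq_getElem _ _ (by simpa [pv_counts_len] using hv),
    List.getElem_map]
  have := pv_counts_getD wd v hv
  rw [PySem.List.pyGetD_natCast, List.getD_eq_getElem _ _ (by simpa [pv_counts_len] using hv)] at this
  rw [this]

-- ---- characterising pvPrefix ----

theorem pv_prefix_fold (q : List Int) (P0 : List Int) (s0 : Int) :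
    (q.foldl (fun (p : List Int × Int) c => (p.1 ++ [p.2 + c], p.2 + c)) (P0, s0)).1 =
      P0 ++ (List.range q.length).map (fun k => s0 + (q.take (k + 1)).sum) := by
  induction q generalizing P0 s0 with
  | nil => simp
  | cons c q ih =>
    simp only [List.foldl_cons, ih, List.length_cons]
    rw [List.range_succ_eq_map]
    simp only [List.map_cons, List.map_map]
    rw [List.append_assoc]
    congr 1
    simp only [List.take_succ_cons, List.sum_cons, List.singleton_append]
    congr 1
    · simp
    · apply List.map_congr_left
      intro k _
      simp [Function.comp]
      ring

theorem pv_prefix_getD (q : List Int) (k : Nat) (hk : k ≤ q.length) :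
    PySem.List.pyGetD (pvPrefix q) (k : Int) 0 = (q.take k).sum := by
  unfold pvPrefix
  rw [pv_prefix_fold q [0] 0]
  rw [PySem.List.pyGetD_natCast]
  cases k with
  | zero => simp
  | succ k =>
    rw [List.singleton_append, List.getD_cons_succ,
      List.getD_eq_getElem _ _ (by simpa using (by omega : k < q.length)), List.getElem_map,
      List.getElem_range]
    simp

theorem pv_take_sum (wd : List Int) (t : Int) (k : Nat) (hk : k ≤ 100) :
    ((pvQuot (pvCounts wd) t).take k).sum =
      ((PySem.List.pyRange 0 (k : Int) 1).map (fun i => pvQf wd t i)).sum := by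
  induction k with
  | zero => simp
  | succ k ih =>
    have hk' : k ≤ 100 := by omega
    have hlen : (pvQuot (pvCounts wd) t).length = 100 := by
      simp [pvQuot, pv_counts_len]
    rw [List.sum_take_succ _ _ (by omega), ih hk']
    have : ((k : Nat) : Int) + 1 = (((k + 1 : Nat)) : Int) := by push_cast; ring
    rw [show ((k + 1 : Nat) : Int) = ((k : Nat) : Int) + 1 by push_cast; ring,
      PySem.List.pyRange_one_succ_right (by positivity), List.map_append, List.sum_append]
    simp only [List.map_cons, List.map_nil, List.sum_cons, List.sum_nil, add_zero]
    congr 1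
    have hq := pv_quot_getD wd t k (by omega)
    rw [PySem.List.pyGetD_natCast, List.getD_eq_getElem _ _ (by omega)] at hq
    exact hq

-- ---- the window sum ----

theorem pv_sum_ite_window (f : Int → Int) (lo hi : Int)
    (h0 : 0 ≤ lo) (hlh : lo ≤ hi) (hh : hi ≤ 100) :
    ((PySem.List.pyRange 0 100 1).map (fun i => if lo ≤ i ∧ i < hi then f i else 0)).sum =
      ((PySem.List.pyRange lo hi 1).map f).sum := by
  rw [PySem.List.pyRange_one_append 0 lo 100 h0 (by omega),
    PySem.List.pyRange_one_append lo hi 100 hlh hh]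
  simp only [List.map_append, List.sum_append]
  have h1 : ((PySem.List.pyRange 0 lo 1).map (fun i => if lo ≤ i ∧ i < hi then f i else 0)).sum = 0 := by
    apply List.sum_eq_zero
    intro x hx
    rcases List.mem_map.mp hx with ⟨i, hi', rfl⟩
    have := PySem.List.mem_pyRange_one.mp hi'
    rw [if_neg (by omega)]
  have h3 : ((PySem.List.pyRange hi 100 1).map (fun i => if lo ≤ i ∧ i < hi then f i else 0)).sum = 0 := by
    apply List.sum_eq_zero
    intro x hx
    rcases List.mem_map.mp hx with ⟨i, hi', rfl⟩
    have := PySem.List.mem_pyRange_one.mp hi'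
    rw [if_neg (by omega)]
  have h2 : ((PySem.List.pyRange lo hi 1).map (fun i => if lo ≤ i ∧ i < hi then f i else 0)).sum =
      ((PySem.List.pyRange lo hi 1).map f).sum := by
    congr 1
    apply List.map_congr_left
    intro i hi'
    have := PySem.List.mem_pyRange_one.mp hi'
    rw [if_pos (by omega)]
  rw [h1, h2, h3]
  ring

theorem pv_sum_split (wd : List Int) (t v : Int) :
    pvSum wd t v =
      ((PySem.List.pyRange 0 100 1).map
        (fun i => if i ≤ v ∧ v ≤ i + t - 2 then pvQf wd t i else 0)).sum +
      ((PySem.List.pyRange 0 100 1).map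
        (fun i => if v = i + t - 1 then pvLast wd t i else 0)).sum := by
  unfold pvSum pvContrib
  induction PySem.List.pyRange 0 100 1 with
  | nil => simp
  | cons a l ih => simp only [List.map_cons, List.sum_cons, ih]; ring

-- the emission weight equals the total contribution
theorem pv_weight_eq (wd : List Int) (t v : Int) (ht : 1 ≤ t)
    (hv : 0 ≤ v ∧ v ≤ 99 + t - 1) :
    pvWeight (pvCounts wd) (pvQuot (pvCounts wd) t) (pvPrefix (pvQuot (pvCounts wd) t)) t v =
      pvSum wd t v := by
  have hqlen : (pvQuot (pvCounts wd) t).length = 100 := by simp [pvQuot, pv_counts_len]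
  rw [pv_sum_split]
  unfold pvWeight
  simp only []
  -- the tail term
  have htail : ((PySem.List.pyRange 0 100 1).map
      (fun i => if v = i + t - 1 then pvLast wd t i else 0)).sum =
      if 0 ≤ v - t + 1 ∧ v - t + 1 < 100 then pvLast wd t (v - t + 1) else 0 := by
    have e : ∀ i ∈ PySem.List.pyRange 0 100 1,
        (if v = i + t - 1 then pvLast wd t i else 0) =
          (if i = v - t + 1 then pvLast wd t i else 0) := by
      intro i _
      exact if_congr (by omega) rfl rfl
    rw [List.map_congr_left e,
      pv_sum_ite_single _ (PySem.List.nodup_pyRange_one 0 100) (v - t + 1) _]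
    simp only [PySem.List.mem_pyRange_one]
  -- the window term
  have hwin : (if max (v - t + 2) 0 < min (v + 1) 100 then
        PySem.List.pyGetD (pvPrefix (pvQuot (pvCounts wd) t)) (min (v + 1) 100) 0 -
          PySem.List.pyGetD (pvPrefix (pvQuot (pvCounts wd) t)) (max (v - t + 2) 0) 0
      else 0) =
      ((PySem.List.pyRange 0 100 1).map
        (fun i => if i ≤ v ∧ v ≤ i + t - 2 then pvQf wd t i else 0)).sum := by
    set lo : Int := max (v - t + 2) 0 with hlo
    set hi : Int := min (v + 1) 100 with hhi
    by_cases hlh : lo < hi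
    · rw [if_pos hlh]
      have hlo0 : 0 ≤ lo := by omega
      have hhi100 : hi ≤ 100 := by omega
      have hgetL : PySem.List.pyGetD (pvPrefix (pvQuot (pvCounts wd) t)) lo 0 =
          ((PySem.List.pyRange 0 lo 1).map (fun i => pvQf wd t i)).sum := by
        have h1 := pv_prefix_getD (pvQuot (pvCounts wd) t) lo.toNat (by omega)
        rw [Int.toNat_of_nonneg hlo0] at h1
        rw [h1, pv_take_sum wd t lo.toNat (by omega), Int.toNat_of_nonneg hlo0]
      have hgetH : PySem.List.pyGetD (pvPrefix (pvQuot (pvCounts wd) t)) hi 0 =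
          ((PySem.List.pyRange 0 hi 1).map (fun i => pvQf wd t i)).sum := by
        have h1 := pv_prefix_getD (pvQuot (pvCounts wd) t) hi.toNat (by omega)
        rw [Int.toNat_of_nonneg (by omega)] at h1
        rw [h1, pv_take_sum wd t hi.toNat (by omega), Int.toNat_of_nonneg (by omega)]
      rw [hgetL, hgetH,
        PySem.List.pyRange_one_append 0 lo hi hlo0 (by omega), List.map_append, List.sum_append]
      have e : ∀ i ∈ PySem.List.pyRange 0 100 1,
          (if i ≤ v ∧ v ≤ i + t - 2 then pvQf wd t i else 0) =
            (if lo ≤ i ∧ i < hi then pvQf wd t i else 0) := by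
        intro i hi'
        have := PySem.List.mem_pyRange_one.mp hi'
        exact if_congr (by omega) rfl rfl
      rw [List.map_congr_left e, pv_sum_ite_window _ lo hi hlo0 (by omega) hhi100]
      ring
    · rw [if_neg hlh]
      symm
      apply List.sum_eq_zero
      intro x hx
      rcases List.mem_map.mp hx with ⟨i, hi', rfl⟩
      have := PySem.List.mem_pyRange_one.mp hi'
      rw [if_neg (by omega)]
  -- assemble
  by_cases hb : 0 ≤ v - t + 1 ∧ v - t + 1 < 100
  · rw [if_pos hb, htail, if_pos hb, hwin]
    have hcnt : PySem.List.pyGetD (pvCounts wd) (v - t + 1) 0 =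
        ((List.count (v - t + 1) wd : Nat) : Int) := by
      have h1 := pv_counts_getD wd (v - t + 1).toNat (by omega)
      rw [Int.toNat_of_nonneg hb.1] at h1
      exact h1
    have hq : PySem.List.pyGetD (pvQuot (pvCounts wd) t) (v - t + 1) 0 = pvQf wd t (v - t + 1) := by
      have h1 := pv_quot_getD wd t (v - t + 1).toNat (by omega)
      rw [Int.toNat_of_nonneg hb.1] at h1
      exact h1
    rw [hcnt, hq]
    unfold pvLast
    ring
  · rw [if_neg hb, htail, if_neg hb, hwin]
    ring

-- B's port is the descending emission of pvSum
theorem pv_B_eq (wd : List Int) (t : Int) (ht : 1 ≤ t) :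
    next_wins_distribution_alt wd t =
      (PySem.List.pyRange (99 + t - 1) (-1) (-1)).flatMap
        (fun v => List.replicate (pvSum wd t v).toNat v) := by
  simp only [next_wins_distribution_alt]
  have hbody : ∀ (out : List Int) (v : Int), v ∈ PySem.List.pyRange (99 + t - 1) (-1) (-1) →
      (fun (out : List Int) (v : Int) =>
        out ++ PySem.List.pyRepeat [v]
          (pvWeight (pvCounts wd) (pvQuot (pvCounts wd) t)
            (pvPrefix (pvQuot (pvCounts wd) t)) t v)) out v =
      out ++ List.replicate (pvSum wd t v).toNat v := by
    intro out v hv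
    have hv' := PySem.List.mem_pyRange_neg_one.mp hv
    simp only [PySem.List.pyRepeat_singleton]
    rw [pv_weight_eq wd t v ht (by omega)]
  rw [PySem.List.foldl_congr_mem _ _ _ ([] : List Int) hbody,
    PySem.List.foldl_append_eq_flatMap]
  simp

-- ---- counting both sides ----

theorem pv_count_presort (wd : List Int) (t v : Int) :
    (pvPresort wd t).count v =
      ((PySem.List.pyRange 0 100 1).map (fun i => pvNContrib wd t i v)).sum := by
  unfold pvPresort
  rw [pv_count_flatMap]
  congr 1
  apply List.map_congr_left
  intro i _
  rw [List.count_append, pv_count_flatMap]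
  have e1 : ∀ j ∈ PySem.List.pyRange 0 (t - 1) 1,
      (List.replicate (pvQf wd t i).toNat (i + j)).count v =
        if j = v - i then (pvQf wd t i).toNat else 0 := by
    intro j _
    rw [List.count_replicate]
    simp only [beq_iff_eq]
    exact if_congr (by omega) rfl rfl
  rw [List.map_congr_left e1,
    pv_sum_ite_single _ (PySem.List.nodup_pyRange_one 0 (t - 1)) (v - i) _,
    List.count_replicate]
  simp only [beq_iff_eq, PySem.List.mem_pyRange_one]
  unfold pvNContrib
  rw [if_congr (show ((0 : Int) ≤ v - i ∧ v - i < t - 1) ↔ (i ≤ v ∧ v ≤ i + t - 2) by omega) rfl rfl,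
    if_congr (show (i + t - 1 = v) ↔ (v = i + t - 1) by omega) rfl rfl]

theorem pv_qf_nonneg (wd : List Int) (t i : Int) (ht : 1 ≤ t) : 0 ≤ pvQf wd t i := by
  unfold pvQf
  rw [PySem.Int.floordiv_eq_ediv_of_pos (by omega)]
  exact Int.ediv_nonneg (by positivity) (by omega)

theorem pv_last_nonneg (wd : List Int) (t i : Int) (ht : 1 ≤ t) : 0 ≤ pvLast wd t i := by
  unfold pvLast pvQf
  rw [PySem.Int.floordiv_eq_ediv_of_pos (by omega)]
  have hc0 : (0 : Int) ≤ ((List.count i wd : Nat) : Int) := by positivity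
  have hd := Int.ediv_add_emod ((List.count i wd : Nat) : Int) t
  have hr := Int.emod_nonneg ((List.count i wd : Nat) : Int) (by omega : t ≠ 0)
  have hq' : (0 : Int) ≤ ((List.count i wd : Nat) : Int) / t := Int.ediv_nonneg hc0 (by omega)
  nlinarith [hd, hr, hq']

theorem pv_sum_toNat (wd : List Int) (t v : Int) (ht : 1 ≤ t) :
    (pvSum wd t v).toNat =
      ((PySem.List.pyRange 0 100 1).map (fun i => pvNContrib wd t i v)).sum := by
  have hcast : ∀ i, ((pvNContrib wd t i v : Nat) : Int) = pvContrib wd t i v := by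
    intro i
    unfold pvNContrib pvContrib
    push_cast
    rw [Int.toNat_of_nonneg (pv_qf_nonneg wd t i ht), Int.toNat_of_nonneg (pv_last_nonneg wd t i ht)]
  have h2 : pvSum wd t v =
      ((((PySem.List.pyRange 0 100 1).map (fun i => pvNContrib wd t i v)).sum : Nat) : Int) := by
    unfold pvSum
    rw [Nat.cast_list_sum, List.map_map]
    congr 1
    exact List.map_congr_left (fun i _ => (hcast i).symm)
  rw [h2, Int.toNat_natCast]

theorem pv_ncontrib_zero (wd : List Int) (t i v : Int) (hi : 0 ≤ i ∧ i < 100) (ht : 1 ≤ t)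
    (hv : ¬ (0 ≤ v ∧ v ≤ 99 + t - 1)) : pvNContrib wd t i v = 0 := by
  unfold pvNContrib
  rw [if_neg (by omega), if_neg (by omega)]

theorem pv_nodup_rdesc (t : Int) : (PySem.List.pyRange (99 + t - 1) (-1) (-1)).Nodup := by
  rw [PySem.List.pyRange_neg_one]
  exact (List.nodup_range).map (fun a b h => by omega)

theorem pv_pairwise_rdesc (t : Int) :
    (PySem.List.pyRange (99 + t - 1) (-1) (-1)).Pairwise (fun a b => b < a) := by
  rw [PySem.List.pyRange_neg_one]
  exact List.Pairwise.map _ (fun a b h => by omega) List.pairwise_lt_range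

theorem pv_pairwise_flatMap_replicate (R : List Int) (n : Int → Nat)
    (hR : R.Pairwise (fun a b => b < a)) :
    (R.flatMap (fun v => List.replicate (n v) v)).Pairwise (fun a b => b ≤ a) := by
  induction R with
  | nil => simp
  | cons v R ih =>
    have hv := (List.pairwise_cons.mp hR).1
    have hR' := (List.pairwise_cons.mp hR).2
    rw [List.flatMap_cons, List.pairwise_append]
    refine ⟨?_, ih hR', ?_⟩
    · exact List.pairwise_replicate.mpr (Or.inr le_rfl)
    · intro a ha b hb
      rcases List.mem_flatMap.mp hb with ⟨v', hv', hb'⟩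
      rw [List.eq_of_mem_replicate ha, List.eq_of_mem_replicate hb']
      exact le_of_lt (hv v' hv')

theorem pv_count_out (wd : List Int) (t u : Int) (ht : 1 ≤ t) :
    ((PySem.List.pyRange (99 + t - 1) (-1) (-1)).flatMap
        (fun v => List.replicate (pvSum wd t v).toNat v)).count u =
      ((PySem.List.pyRange 0 100 1).map (fun i => pvNContrib wd t i u)).sum := by
  rw [pv_count_flatMap]
  have e : ∀ v ∈ PySem.List.pyRange (99 + t - 1) (-1) (-1),
      (List.replicate (pvSum wd t v).toNat v).count u =
        if v = u then (pvSum wd t v).toNat else 0 := by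
    intro v _
    rw [List.count_replicate]
    simp only [beq_iff_eq]
  rw [List.map_congr_left e,
    pv_sum_ite_single _ (pv_nodup_rdesc t) u (fun v => (pvSum wd t v).toNat)]
  by_cases hm : u ∈ PySem.List.pyRange (99 + t - 1) (-1) (-1)
  · rw [if_pos hm, pv_sum_toNat wd t u ht]
  · rw [if_neg hm]
    refine (List.sum_eq_zero fun x hx => ?_).symm
    rcases List.mem_map.mp hx with ⟨i, hi, rfl⟩
    have hi' := PySem.List.mem_pyRange_one.mp hi
    refine pv_ncontrib_zero wd t i u ⟨hi'.1, hi'.2⟩ ht (fun hc => hm ?_)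
    exact PySem.List.mem_pyRange_neg_one.mpr (by omega)

-- ===== VERDICT (by name: the statement is the Claim_ definition above) =====
theorem next_wins_distribution_spec : Claim_equal_next_wins_distribution := by
  intro wd t _hdom ht
  unfold Spec_next_wins_distribution
  rw [pv_A_eq wd t ht, pv_B_eq wd t ht]
  have hcnt : ∀ u : Int, (pvPresort wd t).count u =
      ((PySem.List.pyRange (99 + t - 1) (-1) (-1)).flatMap
        (fun v => List.replicate (pvSum wd t v).toNat v)).count u := by
    intro u
    rw [pv_count_presort, pv_count_out wd t u ht]
  have hperm : (PySem.List.sorted (pvPresort wd t) (fun x => x) true).Perm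
      ((PySem.List.pyRange (99 + t - 1) (-1) (-1)).flatMap
        (fun v => List.replicate (pvSum wd t v).toNat v)) :=
    (PySem.List.sorted_perm _ _ _).trans (List.perm_iff_count.mpr hcnt)
  refine PySem.List.eq_of_perm_of_pairwise_le_of_injective (key := fun x : Int => -x)
    neg_injective hperm ?_ ?_
  · exact (PySem.List.sorted_pairwise_rev _ _).imp (fun h => by simpa using neg_le_neg h)
  · exact (pv_pairwise_flatMap_replicate _ _ (pv_pairwise_rdesc t)).imp
      (fun h => by simpa using neg_le_neg h)
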